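-- pv_equiv track=rewrite | github.com/murdok1982/SistemaChitauri | backend/shared/security/mtls.py | _extract_cn
-- ===== SOURCE A (Python) =====
-- def _extract_cn(subject: str) -> str:
--     """Extrae Common Name del subject del certificado."""
--     try:
--         for part in subject.split(","):
--             if part.strip().startswith("CN="):
--                 return part.strip()[3:]
--     except Exception:
--         pass
--     return "unknown"
-- ===== SOURCE B (Python) =====
-- def _extract_cn(subject: str) -> str:
--     """Extrae Common Name del subject del certificado."""
--     s = subject
--     while True:
--         i = 0
--         while i < len(s) and s[i].isspace():
--             i += 1
--         k = s.find(",")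
--         if s.startswith("CN=", i):
--             end = len(s) if k == -1 else k
--             return s[i + 3:end].rstrip()
--         if k == -1:
--             return "unknown"
--         s = s[k + 1:]
-- ===== Notes on version B (the rewrite author's own statement) =====
-- stated objective: alternative
-- what changed: replaces split-into-parts plus per-part strip with a single in-place scan: skip leading whitespace, test the common-name marker at the first non-space of each segment with an offset startswith, and slice the value up to the next comma located by find
import Mathlib
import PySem

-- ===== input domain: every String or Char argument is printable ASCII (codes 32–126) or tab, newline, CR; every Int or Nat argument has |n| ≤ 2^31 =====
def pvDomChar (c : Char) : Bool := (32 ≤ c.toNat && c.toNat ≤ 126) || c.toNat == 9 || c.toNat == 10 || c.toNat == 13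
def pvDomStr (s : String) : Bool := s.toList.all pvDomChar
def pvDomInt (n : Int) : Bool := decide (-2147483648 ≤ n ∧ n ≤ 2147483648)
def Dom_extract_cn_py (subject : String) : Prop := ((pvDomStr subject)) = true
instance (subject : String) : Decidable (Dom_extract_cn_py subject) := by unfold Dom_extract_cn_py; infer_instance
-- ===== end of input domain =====

-- B replaces A's split-into-parts + per-part strip with a single in-place scan of the
-- string (skip whitespace, offset startswith, find the next comma); same return value.

-- ===== PORT A =====
-- the 'for part in subject.split(",")' loop of A; the try/except never fires for a str argument
def extractCnLoopA : List (List Char) → String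
  | [] => "unknown"
  | p :: ps =>
    if PySem.Chars.startswith (PySem.Chars.strip p) ['C', 'N', '='] then
      String.ofList (PySem.List.slice (PySem.Chars.strip p) (some 3) none)   -- part.strip()[3:]
    else extractCnLoopA ps

def extract_cn_py (subject : String) : String :=
  extractCnLoopA (PySem.Chars.splitOn subject.toList [','])

-- ===== PORT B =====
-- termination of the scan: s[k+1:] is strictly shorter when s is nonempty and k ≥ 0
theorem pvSliceFromLenLt (s : List Char) (k : Int) (hk : 0 ≤ k) (hs : s ≠ []) :
    (PySem.List.slice s (some (k + 1)) none).length < s.length := by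
  rw [PySem.List.slice_from s (by omega)]
  have h1 : 0 < (k + 1).toNat := by omega
  have h2 : 0 < s.length := List.length_pos_iff.mpr hs
  simp only [List.length_drop]
  omega

-- the 'while True' scan of B over the character list
def extractCnScan (s : List Char) : String :=
  -- i: final value of the inner 'while i < len(s) and s[i].isspace(): i += 1' loop,
  -- i.e. the length of the whitespace prefix of s
  let i : Nat := (s.takeWhile PySem.Chars.isspace).length
  let k : Int := PySem.Chars.find s [',']
  -- s.startswith("CN=", i) is startswith on s[i:] (exact: i ≤ len(s))
  if PySem.Chars.startswith (s.drop i) ['C', 'N', '='] then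
    let e : Int := if k = -1 then (s.length : Int) else k
    String.ofList (PySem.Chars.rstrip (PySem.List.slice s (some ((i : Int) + 3)) (some e)))
  else if hk : k = -1 then "unknown"
  else extractCnScan (PySem.List.slice s (some (k + 1)) none)
termination_by s.length
decreasing_by
  exact pvSliceFromLenLt s _ (by have := PySem.Chars.neg_one_le_find s [',']; omega)
    (by
      have : [','] <:+: s := (PySem.Chars.find_nonneg_iff s [',']).mp
        (by have := PySem.Chars.neg_one_le_find s [',']; omega)
      intro h; rw [h] at this; simp at this)

def extract_cn_py_alt (subject : String) : String :=
  extractCnScan subject.toList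

-- ===== PRECONDITION & SPEC =====
def Spec_extract_cn_py (subject : String) (out : String) : Prop := out = extract_cn_py_alt subject
instance (subject : String) (out : String) : Decidable (Spec_extract_cn_py subject out) := by unfold Spec_extract_cn_py; infer_instance

-- ===== CLAIM (what is proved, stated in full; the proofs are below) =====
def Claim_equal_extract_cn_py : Prop := ∀ (subject : String), Dom_extract_cn_py subject → Spec_extract_cn_py subject (extract_cn_py subject)

-- ===== LEMMAS AND PROOFS =====

-- structural description of splitOn … [','] used to relate the two traversals
def pvCsplit : List Char → List (List Char)
  | [] => [[]]
  | c :: rest =>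
    if c = ',' then [] :: pvCsplit rest
    else
      match pvCsplit rest with
      | [] => [[c]]
      | s :: ss => (c :: s) :: ss

def pvConsH (p : List Char) : List (List Char) → List (List Char)
  | [] => [p]
  | s :: ss => (p ++ s) :: ss

theorem pvCsplit_ne_nil (l : List Char) : pvCsplit l ≠ [] := by
  cases l with
  | nil => simp [pvCsplit]
  | cons c rest =>
    simp only [pvCsplit]
    split
    · simp
    · cases h : pvCsplit rest <;> simp

theorem pvSplitOnGo_eq (fuel : Nat) :
    ∀ (l cur : List Char) (acc : List (List Char)), l.length < fuel →
      PySem.Chars.splitOn.go [','] fuel l cur acc = acc.reverse ++ pvConsH cur.reverse (pvCsplit l) := by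
  induction fuel with
  | zero => intro l cur acc h; omega
  | succ fuel ih =>
    intro l cur acc h
    cases l with
    | nil =>
      simp [PySem.Chars.splitOn.go, pvCsplit, pvConsH]
    | cons c rest =>
      simp only [PySem.Chars.splitOn.go, List.isPrefixOf, pvCsplit]
      by_cases hc : c = ','
      · subst hc
        simp only [beq_self_eq_true, Bool.true_and, if_true]
        rw [show List.drop [','].length (',' :: rest) = rest from rfl]
        rw [ih rest [] (cur.reverse :: acc) (by simpa using Nat.lt_of_succ_lt_succ h)]
        cases hs : pvCsplit rest with
        | nil => exact absurd hs (pvCsplit_ne_nil rest)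
        | cons s ss => simp [pvConsH]
      · have hb : (',' == c) = false := beq_eq_false_iff_ne.mpr (Ne.symm hc)
        simp only [hb, Bool.false_and, Bool.false_eq_true, if_false]
        rw [ih rest (c :: cur) acc (by simpa using Nat.lt_of_succ_lt_succ h)]
        cases hs : pvCsplit rest with
        | nil => exact absurd hs (pvCsplit_ne_nil rest)
        | cons s ss => simp [pvConsH, hc]

theorem pvSplitOn_eq (cs : List Char) :
    PySem.Chars.splitOn cs [','] = pvCsplit cs := by
  show PySem.Chars.splitOn.go [','] (cs.length + 1) cs [] [] = _
  rw [pvSplitOnGo_eq (cs.length + 1) cs [] [] (by omega)]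
  cases hs : pvCsplit cs with
  | nil => exact absurd hs (pvCsplit_ne_nil cs)
  | cons s ss => simp [pvConsH]

theorem pvCsplit_no_comma (cs : List Char) (h : ',' ∉ cs) : pvCsplit cs = [cs] := by
  induction cs with
  | nil => simp [pvCsplit]
  | cons c rest ih =>
    have hc : c ≠ ',' := fun he => h (by simp [he])
    have hr : ',' ∉ rest := fun hm => h (by simp [hm])
    simp [pvCsplit, hc, ih hr]

theorem pvCsplit_comma (pre rest : List Char) (h : ',' ∉ pre) :
    pvCsplit (pre ++ ',' :: rest) = pre :: pvCsplit rest := by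
  induction pre with
  | nil => simp [pvCsplit]
  | cons c pre' ih =>
    have hc : c ≠ ',' := fun he => h (by simp [he])
    have hr : ',' ∉ pre' := fun hm => h (by simp [hm])
    simp [pvCsplit, hc, ih hr]

-- find points at the first comma
theorem pvFind_comma (pre rest : List Char) (h : ',' ∉ pre) :
    PySem.Chars.find (pre ++ ',' :: rest) [','] = (pre.length : Int) := by
  set s := pre ++ ',' :: rest with hs
  have hinf : [','] <:+: s := (List.singleton_infix_iff ',' s).mpr (by simp [hs])
  have hnn : 0 ≤ PySem.Chars.find s [','] := (PySem.Chars.find_nonneg_iff s [',']).mpr hinf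
  obtain ⟨hpref, hmin⟩ := PySem.Chars.find_spec hnn
  set n := (PySem.Chars.find s [',']).toNat with hn
  have hlt : ¬ pre.length < n := by
    intro hl
    exact hmin pre.length hl (by simp [hs, List.drop_left'])
  have hge : ¬ n < pre.length := by
    intro hl
    rw [List.cons_prefix_iff] at hpref
    obtain ⟨t, ht, -⟩ := hpref
    have : s[n]? = some ',' := by rw [← List.head?_drop, ht]; rfl
    rw [hs, List.getElem?_append_left hl] at this
    exact h (List.mem_of_getElem? this)
  have : n = pre.length := by omega
  omega

theorem pvDrop_takeWhile (p : Char → Bool) (l : List Char) :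
    l.drop (l.takeWhile p).length = l.dropWhile p := by
  nth_rewrite 2 [← List.takeWhile_append_dropWhile (p := p) (l := l)]
  exact List.drop_left

theorem pvTakeWhile_comma (pre rest : List Char) :
    (pre ++ ',' :: rest).takeWhile PySem.Chars.isspace = pre.takeWhile PySem.Chars.isspace := by
  rw [List.takeWhile_append]
  split
  · rename_i hlen
    rw [(List.takeWhile_prefix _).eq_of_length hlen]
    simp [PySem.Chars.isspace]
  · rfl

-- "CN=" contains no comma, so a prefix test cannot cross the first comma
theorem pvPrefix_through_comma (sub : List Char) (hsub : ',' ∉ sub) (lp rest : List Char) :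
    sub <+: lp ++ ',' :: rest ↔ sub <+: lp := by
  induction sub generalizing lp with
  | nil => simp
  | cons c cs ih =>
    have hc : c ≠ ',' := fun he => hsub (by simp [he])
    have hcs : ',' ∉ cs := fun hm => hsub (by simp [hm])
    cases lp with
    | nil =>
      simp only [List.nil_append, List.cons_prefix_cons]
      constructor
      · rintro ⟨he, -⟩; exact absurd he hc
      · intro h2; simp at h2
    | cons d lp' =>
      simp only [List.cons_append, List.cons_prefix_cons]
      exact and_congr_right fun _ => ih hcs lp'

theorem pvRstrip_append (xs ys : List Char) :
    PySem.Chars.rstrip (xs ++ ys) =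
      if PySem.Chars.rstrip ys = [] then PySem.Chars.rstrip xs else xs ++ PySem.Chars.rstrip ys := by
  simp only [PySem.Chars.rstrip, List.reverse_append, List.dropWhile_append]
  by_cases he : List.dropWhile PySem.Chars.isspace ys.reverse = []
  · simp [he]
  · simp [he]

theorem pvRstrip_cn (t : List Char) :
    PySem.Chars.rstrip (['C', 'N', '='] ++ t) = ['C', 'N', '='] ++ PySem.Chars.rstrip t := by
  rw [pvRstrip_append]
  split
  · rename_i he; rw [he]; simp; decide
  · rfl

theorem pvRstrip_prefix (l : List Char) : PySem.Chars.rstrip l <+: l := by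
  have h := List.dropWhile_suffix (l := l.reverse) (p := PySem.Chars.isspace)
  simp only [PySem.Chars.rstrip]
  simpa using List.reverse_prefix.mpr h

theorem pvCn_prefix_rstrip (lp : List Char) :
    ['C', 'N', '='] <+: PySem.Chars.rstrip lp ↔ ['C', 'N', '='] <+: lp := by
  constructor
  · intro h; exact h.trans (pvRstrip_prefix lp)
  · rintro ⟨t, ht⟩
    rw [← ht, pvRstrip_cn]
    exact ⟨PySem.Chars.rstrip t, rfl⟩

theorem pvSplitAtComma (cs : List Char) (h : ',' ∈ cs) :
    ∃ pre rest, ',' ∉ pre ∧ cs = pre ++ ',' :: rest := by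
  induction cs with
  | nil => simp at h
  | cons c t ih =>
    by_cases hc : c = ','
    · exact ⟨[], t, by simp, by simp [hc]⟩
    · have hm : ',' ∈ t := by
        rcases List.mem_cons.mp h with h1 | h1
        · exact absurd h1.symm hc
        · exact h1
      obtain ⟨pre, rest, hp, he⟩ := ih hm
      refine ⟨c :: pre, rest, ?_, by simp [he]⟩
      intro hx
      rcases List.mem_cons.mp hx with h2 | h2
      · exact hc h2.symm
      · exact hp h2

theorem pvSliceThree (x : List Char) : PySem.List.slice x (some 3) none = x.drop 3 :=
  PySem.List.slice_from x (by norm_num)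

-- one step of the equivalence, stated on the char list
theorem pvMain (n : Nat) : ∀ (cs : List Char), cs.length ≤ n →
    extractCnLoopA (pvCsplit cs) = extractCnScan cs := by
  induction n with
  | zero =>
    intro cs h
    have : cs = [] := by cases cs <;> simp_all
    subst this
    rw [extractCnScan]
    simp [pvCsplit, extractCnLoopA, PySem.Chars.strip, PySem.Chars.lstrip, PySem.Chars.rstrip,
      PySem.Chars.startswith, PySem.Chars.find, PySem.Chars.find.go]
  | succ n ih =>
    intro cs hlen
    by_cases hmem : ',' ∈ cs
    · obtain ⟨pre, rest, hpre, rfl⟩ := pvSplitAtComma cs hmem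
      have hfind : PySem.Chars.find (pre ++ ',' :: rest) [','] = (pre.length : Int) :=
        pvFind_comma pre rest hpre
      have hsplit : pre.takeWhile PySem.Chars.isspace ++ pre.dropWhile PySem.Chars.isspace = pre :=
        List.takeWhile_append_dropWhile
      have hi_le : (pre.takeWhile PySem.Chars.isspace).length ≤ pre.length :=
        (List.takeWhile_prefix _).length_le
      have hdropi : (pre ++ ',' :: rest).drop (pre.takeWhile PySem.Chars.isspace).length =
          pre.dropWhile PySem.Chars.isspace ++ ',' :: rest := by
        rw [List.drop_append_of_le_length hi_le, pvDrop_takeWhile]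
      have hCNiff : (['C', 'N', '='] <+: pre.dropWhile PySem.Chars.isspace ++ ',' :: rest) ↔
          ['C', 'N', '='] <+: pre.dropWhile PySem.Chars.isspace :=
        pvPrefix_through_comma _ (by decide) _ rest
      have hstrip : PySem.Chars.strip pre = PySem.Chars.rstrip (pre.dropWhile PySem.Chars.isspace) := rfl
      rw [pvCsplit_comma pre rest hpre, extractCnScan]
      simp only [pvTakeWhile_comma, hfind, hdropi, extractCnLoopA]
      by_cases hCN : ['C', 'N', '='] <+: pre.dropWhile PySem.Chars.isspace
      · obtain ⟨t, ht⟩ := hCN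
        have hrs : PySem.Chars.rstrip (pre.dropWhile PySem.Chars.isspace) =
            ['C', 'N', '='] ++ PySem.Chars.rstrip t := by rw [← ht, pvRstrip_cn]
        rw [if_pos (by rw [PySem.Chars.startswith_iff, hstrip, hrs]; exact ⟨_, rfl⟩)]
        rw [if_pos (by rw [PySem.Chars.startswith_iff]; exact hCNiff.mpr ⟨t, ht⟩)]
        rw [if_neg (show ¬((pre.length : Int) = -1) by omega)]
        have hlen3 : (pre.dropWhile PySem.Chars.isspace).length = 3 + t.length := by
          rw [← ht]; simp; omega
        have hlenpre : pre.length =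
            (pre.takeWhile PySem.Chars.isspace).length + (pre.dropWhile PySem.Chars.isspace).length := by
          nth_rewrite 1 [← hsplit]
          rw [List.length_append]
        rw [hstrip, hrs, pvSliceThree]
        rw [show (((pre.takeWhile PySem.Chars.isspace).length : Int) + 3) =
            (((pre.takeWhile PySem.Chars.isspace).length + 3 : Nat) : Int) by push_cast; ring]
        rw [PySem.List.slice_natCast]
        have hcs2 : pre ++ ',' :: rest =
            pre.takeWhile PySem.Chars.isspace ++ (pre.dropWhile PySem.Chars.isspace ++ ',' :: rest) := by
          rw [← List.append_assoc, hsplit]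
        rw [hcs2, List.drop_length_add_append]
        rw [← ht, List.append_assoc]
        rw [show List.drop 3 (['C', 'N', '='] ++ (t ++ ',' :: rest)) = t ++ ',' :: rest from rfl]
        rw [show pre.length - ((pre.takeWhile PySem.Chars.isspace).length + 3) = t.length by omega]
        rw [List.take_left' rfl]
        rfl
      · rw [if_neg (by rw [PySem.Chars.startswith_iff, hstrip]; exact fun hp => hCN ((pvCn_prefix_rstrip _).mp hp))]
        rw [if_neg (by rw [PySem.Chars.startswith_iff]; exact fun hp => hCN (hCNiff.mp hp))]
        rw [dif_neg (show ¬((pre.length : Int) = -1) by omega)]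
        rw [show ((pre.length : Int) + 1) = ((pre.length + 1 : Nat) : Int) by push_cast; ring]
        rw [PySem.List.slice_from_natCast]
        rw [show pre.length + 1 = pre.length + 1 by rfl]
        rw [show (pre ++ ',' :: rest).drop (pre.length + 1) = rest by
          rw [show pre.length + 1 = pre.length + 1 from rfl]
          have := List.drop_length_add_append (i := 1) (l₁ := pre) (l₂ := ',' :: rest)
          simpa using this]
        exact ih rest (by simp at hlen; omega)
    · have hfind : PySem.Chars.find cs [','] = -1 :=
        (PySem.Chars.find_eq_neg_one_iff cs [',']).mpr (fun hinf => hmem ((List.singleton_infix_iff ',' cs).mp hinf))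
      have hdropi : cs.drop (cs.takeWhile PySem.Chars.isspace).length = cs.dropWhile PySem.Chars.isspace :=
        pvDrop_takeWhile _ cs
      have hstrip : PySem.Chars.strip cs = PySem.Chars.rstrip (cs.dropWhile PySem.Chars.isspace) := rfl
      rw [pvCsplit_no_comma cs hmem, extractCnScan]
      simp only [hfind, hdropi, extractCnLoopA]
      by_cases hCN : ['C', 'N', '='] <+: cs.dropWhile PySem.Chars.isspace
      · obtain ⟨t, ht⟩ := hCN
        have hrs : PySem.Chars.rstrip (cs.dropWhile PySem.Chars.isspace) =
            ['C', 'N', '='] ++ PySem.Chars.rstrip t := by rw [← ht, pvRstrip_cn]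
        rw [if_pos (by rw [PySem.Chars.startswith_iff, hstrip, hrs]; exact ⟨_, rfl⟩)]
        rw [if_pos (by rw [PySem.Chars.startswith_iff]; exact ⟨t, ht⟩)]
        have hsplitc : cs.takeWhile PySem.Chars.isspace ++ cs.dropWhile PySem.Chars.isspace = cs :=
          List.takeWhile_append_dropWhile
        have hlen3 : (cs.dropWhile PySem.Chars.isspace).length = 3 + t.length := by
          rw [← ht]; simp; omega
        have hlencs : cs.length =
            (cs.takeWhile PySem.Chars.isspace).length + (cs.dropWhile PySem.Chars.isspace).length := by
          nth_rewrite 1 [← hsplitc]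
          rw [List.length_append]
        simp only [if_true]
        rw [hstrip, hrs, pvSliceThree]
        rw [show (((cs.takeWhile PySem.Chars.isspace).length : Int) + 3) =
            (((cs.takeWhile PySem.Chars.isspace).length + 3 : Nat) : Int) by push_cast; ring]
        rw [show ((cs.length : Nat) : Int) = ((cs.length : Nat) : Int) from rfl, PySem.List.slice_natCast]
        have hdrop : cs.drop ((cs.takeWhile PySem.Chars.isspace).length + 3) = t := by
          rw [← List.drop_drop, hdropi, ← ht]
          exact List.drop_left' (by decide)
        rw [hdrop]
        rw [show cs.length - ((cs.takeWhile PySem.Chars.isspace).length + 3) = t.length by omega]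
        rw [List.take_length]
        rfl
      · rw [if_neg (by rw [PySem.Chars.startswith_iff, hstrip]; exact fun hp => hCN ((pvCn_prefix_rstrip _).mp hp))]
        rw [if_neg (by rw [PySem.Chars.startswith_iff]; exact hCN)]
        simp

-- ===== VERDICT (by name: the statement is the Claim_ definition above) =====
theorem extract_cn_py_spec : Claim_equal_extract_cn_py := by
  intro subject _
  show extract_cn_py subject = extract_cn_py_alt subject
  unfold extract_cn_py extract_cn_py_alt
  rw [pvSplitOn_eq]
  exact pvMain subject.toList.length subject.toList le_rfl
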